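-- pv_equiv track=rewrite | github.com/amarallab/Amaral_Lab_Intro_to_Data_Science | Amaral_libraries/my_nlp_library.py | get_character_lines
-- ===== SOURCE A (Python) =====
-- def get_character_lines(character, the_play):
--     """
--     This function takes the name of a character and the lines from the play
--     extracted from GP's Complete Works of William Shakespeare and returns
--     a list with all the lines from that character in the play
--
--     inputs:
--         character -- str
--         the_play -- list of str
--
--     returns:
--         character_lines -- list of str
--     """
--     character_lines = []
--     character = character.upper()
--
--     start_string = ' '*2 + character
--     continuation_string = ' '*4
--
--     found_lines = False
--     for i, line in enumerate(the_play):
--         if line.split('.')[0] == start_string: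
--             found_lines = True
--             character_lines.append(line.replace(start_string+ '.', '').strip())
--             continue
--
--         if found_lines:
--             if line[:len(continuation_string)] == continuation_string:
--                 character_lines.append(line.strip())
--             else:
--                 found_lines = False
--                 continue
--
--     return character_lines
-- ===== SOURCE B (Python) =====
-- def get_character_lines(character, the_play):
--     """Staged rewrite: first collect every start-line index, then expand each
--     start into its speech block with an independent forward scan."""
--     target = '  ' + character.upper()
--
--     def is_start(line):
--         return line.split('.')[0] == target
--
--     starts = [i for i, line in enumerate(the_play) if is_start(line)]
--
--     out = []
--     n = len(the_play)
--     for i in starts: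
--         out.append(the_play[i].replace(target + '.', '').strip())
--         j = i + 1
--         while j < n and not is_start(the_play[j]) and the_play[j][:4] == '    ':
--             out.append(the_play[j].strip())
--             j += 1
--     return out
-- ===== Notes on version B (the rewrite author's own statement) =====
-- stated objective: alternative
-- what changed: Replaced A's single streaming loop carrying a found_lines flag across iterations with a staged algorithm: a first pass collects the indices of all speech-start lines, then each start index is independently expanded into its block by a forward scan over the following 4-space-indented lines.
import Mathlib
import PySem

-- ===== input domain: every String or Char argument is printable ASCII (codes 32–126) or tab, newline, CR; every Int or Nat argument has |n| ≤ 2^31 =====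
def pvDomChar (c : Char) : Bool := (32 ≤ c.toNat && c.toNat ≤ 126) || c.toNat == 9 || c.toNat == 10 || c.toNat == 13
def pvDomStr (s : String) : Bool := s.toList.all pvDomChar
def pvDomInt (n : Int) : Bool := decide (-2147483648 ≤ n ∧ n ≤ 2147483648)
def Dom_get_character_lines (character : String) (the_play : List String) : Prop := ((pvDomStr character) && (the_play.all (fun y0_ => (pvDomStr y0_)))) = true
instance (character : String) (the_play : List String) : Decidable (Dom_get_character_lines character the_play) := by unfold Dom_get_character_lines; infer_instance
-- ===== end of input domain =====

-- ===== PORT A =====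
-- B replaces A's single flag-carrying sweep with a staged algorithm: first collect
-- every start-line index, then expand each start into its block with an independent
-- forward scan (objective: alternative decomposition, same cost).
-- helper for A: the recursion carrying the found_lines flag, exactly A's loop
def pvAGo (startS : String) (found : Bool) : List String → List String
  | [] => []
  | line :: rest =>
    -- line.split('.')[0]: sep "." is nonempty, so split? is some and the list nonempty
    if ((PySem.Str.split? line ".").getD []).headD "" == startS then
      PySem.Str.strip (PySem.Str.replace line (startS ++ ".") "") :: pvAGo startS true rest
    else if found then
      if PySem.Str.slice line none (some 4) == "    " then
        PySem.Str.strip line :: pvAGo startS true rest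
      else pvAGo startS false rest
    else pvAGo startS false rest

def get_character_lines (character : String) (the_play : List String) : List String :=
  pvAGo ("  " ++ PySem.Str.upper character) false the_play

-- ===== PORT B =====
def pvIsStart (target : String) (line : String) : Bool :=
  ((PySem.Str.split? line ".").getD []).headD "" == target

-- first pass: indices of all start lines ('[i for i, line in enumerate(...) if is_start(line)]')
def pvStarts (target : String) (xs : List String) : List Int :=
  (PySem.List.enumerate xs 0).filterMap
    (fun p => if pvIsStart target p.2 then some p.1 else none)

-- the per-start forward scan ('while j < n and not is_start(...) and ...[:4] == "    "'),
-- as a recursion over the suffix starting at j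
def pvScan (target : String) : List String → List String
  | [] => []
  | l :: rest =>
    if !pvIsStart target l && PySem.Str.slice l none (some 4) == "    " then
      PySem.Str.strip l :: pvScan target rest
    else []

def get_character_lines_alt (character : String) (the_play : List String) : List String :=
  let target := "  " ++ PySem.Str.upper character
  (pvStarts target the_play).flatMap (fun i =>
    PySem.Str.strip (PySem.Str.replace (PySem.List.pyGetD the_play i "") (target ++ ".") "") ::
      pvScan target (the_play.drop (i.toNat + 1)))

-- ===== PRECONDITION & SPEC =====
def Spec_get_character_lines (character : String) (the_play : List String) (out : List String) : Prop := out = get_character_lines_alt character the_play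
instance (character : String) (the_play : List String) (out : List String) : Decidable (Spec_get_character_lines character the_play out) := by unfold Spec_get_character_lines; infer_instance

-- ===== CLAIM (what is proved, stated in full; the proofs are below) =====
def Claim_equal_get_character_lines : Prop := ∀ (character : String) (the_play : List String), Dom_get_character_lines character the_play → Spec_get_character_lines character the_play (get_character_lines character the_play)

-- ===== LEMMAS AND PROOFS =====
-- continuation predicate shared by the proofs
def pvCont (t : String) (l : String) : Bool :=
  !pvIsStart t l && PySem.Str.slice l none (some 4) == "    "

-- intermediate block-structured form of the computation, used only in the proofs
def pvBGo (t : String) : List String → List String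
  | [] => []
  | line :: rest =>
    if pvIsStart t line then
      let block := rest.takeWhile (pvCont t)
      PySem.Str.strip (PySem.Str.replace line (t ++ ".") "") ::
        (block.map PySem.Str.strip ++ pvBGo t (rest.drop block.length))
    else pvBGo t rest
  termination_by xs => xs.length
  decreasing_by
    · simp
    · simp

theorem pvBGo_cons_start (t line : String) (rest : List String)
    (hs : pvIsStart t line = true) :
    pvBGo t (line :: rest) =
      PySem.Str.strip (PySem.Str.replace line (t ++ ".") "") ::
        ((rest.takeWhile (pvCont t)).map PySem.Str.strip ++
          pvBGo t (rest.drop (rest.takeWhile (pvCont t)).length)) := by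
  rw [pvBGo]; simp [hs]

theorem pvBGo_cons_not (t line : String) (rest : List String)
    (hs : pvIsStart t line = false) :
    pvBGo t (line :: rest) = pvBGo t rest := by
  rw [pvBGo]; simp [hs]

-- A's flag-loop versus the block recursion: found=false runs are pvBGo, and a
-- found=true run first drains the continuation block then resumes as pvBGo.
theorem pvGo_eq (t : String) (xs : List String) :
    pvAGo t false xs = pvBGo t xs ∧
    pvAGo t true xs =
      (xs.takeWhile (pvCont t)).map PySem.Str.strip ++
        pvBGo t (xs.drop (xs.takeWhile (pvCont t)).length) := by
  induction xs with
  | nil => simp [pvAGo, pvBGo]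
  | cons line rest ih =>
    by_cases hs : pvIsStart t line = true
    · have hsplit : (((PySem.Str.split? line ".").getD []).headD "" == t) = true := hs
      have hc : pvCont t line = false := by simp [pvCont, hs]
      rw [pvBGo_cons_start t line rest hs]
      constructor
      · simp only [pvAGo, hsplit, if_true, ih.2]
      · simp only [pvAGo, hsplit, if_true, List.takeWhile_cons, hc, ih.2]
        simp
        rw [pvBGo_cons_start t line rest hs]
    · have hs' : pvIsStart t line = false := by simpa using hs
      have hsplit : (((PySem.Str.split? line ".").getD []).headD "" == t) = false := hs'
      rw [pvBGo_cons_not t line rest hs']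
      constructor
      · simp only [pvAGo, hsplit, Bool.false_eq_true, if_false, ih.1]
      · by_cases h4 : (PySem.Str.slice line none (some 4) == "    ") = true
        · have hc : pvCont t line = true := by simp [pvCont, hs', h4]
          simp only [pvAGo, hsplit, Bool.false_eq_true, if_false, if_true, h4,
            List.takeWhile_cons, hc, ih.2]
          simp
        · have h4' : (PySem.Str.slice line none (some 4) == "    ") = false := by
            simpa using h4
          have hc : pvCont t line = false := by simp [pvCont, h4']
          simp only [pvAGo, hsplit, Bool.false_eq_true, if_false, h4',
            List.takeWhile_cons, hc, ih.1]
          simp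
          rw [pvBGo_cons_not t line rest hs']

-- the body flatMapped over the start indices (B's second stage)
def pvEmit (t : String) (xs : List String) : List String :=
  (pvStarts t xs).flatMap (fun i =>
    PySem.Str.strip (PySem.Str.replace (PySem.List.pyGetD xs i "") (t ++ ".") "") ::
      pvScan t (xs.drop (i.toNat + 1)))

theorem pvScan_eq (t : String) (xs : List String) :
    pvScan t xs = (xs.takeWhile (pvCont t)).map PySem.Str.strip := by
  induction xs with
  | nil => simp [pvScan]
  | cons l rest ih =>
    have hb : (!pvIsStart t l && PySem.Str.slice l none (some 4) == "    ") = pvCont t l := rfl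
    rw [pvScan, hb, List.takeWhile_cons]
    cases h : pvCont t l
    · simp
    · simp [ih]

theorem pvDrop_takeWhile_len {α : Type} (p : α → Bool) (l : List α) :
    l.drop (l.takeWhile p).length = l.dropWhile p := by
  induction l with
  | nil => rfl
  | cons a rest ih =>
    cases h : p a
    · simp [h]
    · simp [h, ih]

theorem pvStarts_mem_nat (t : String) (xs : List String) :
    ∀ i ∈ pvStarts t xs, ∃ k : Nat, i = (k : Int) := by
  intro i hi
  simp only [pvStarts, List.mem_filterMap] at hi
  obtain ⟨p, hp, hif⟩ := hi
  rw [PySem.List.mem_enumerate_iff] at hp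
  obtain ⟨k, hk, rfl⟩ := hp
  split at hif
  · exact ⟨k, by simpa using hif.symm⟩
  · exact absurd hif (by simp)

theorem pvStarts_cons (t l : String) (rest : List String) :
    pvStarts t (l :: rest) =
      (if pvIsStart t l then [(0 : Int)] else []) ++ (pvStarts t rest).map (· + 1) := by
  have shift : ∀ (ys : List String) (s : Int),
      (PySem.List.enumerate ys (s + 1)).filterMap
        (fun p => if pvIsStart t p.2 then some p.1 else none) =
      ((PySem.List.enumerate ys s).filterMap
        (fun p => if pvIsStart t p.2 then some p.1 else none)).map (· + 1) := by
    intro ys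
    induction ys with
    | nil => intro s; simp [PySem.List.enumerate_nil]
    | cons y yr ih =>
      intro s
      simp only [PySem.List.enumerate_cons, List.filterMap_cons]
      by_cases h : pvIsStart t y = true
      · simp [h, ih (s + 1)]
      · have h' : pvIsStart t y = false := by simpa using h
        simp [h', ih (s + 1)]
  simp only [pvStarts, PySem.List.enumerate_cons, List.filterMap_cons]
  by_cases h : pvIsStart t l = true
  · simpa [h] using shift rest 0
  · have h' : pvIsStart t l = false := by simpa using h
    simpa [h'] using shift rest 0

theorem pvFlatMap_congr {α β : Type} (l : List α) (f g : α → List β)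
    (h : ∀ a ∈ l, f a = g a) : l.flatMap f = l.flatMap g := by
  induction l with
  | nil => rfl
  | cons a rest ih =>
    simp only [List.flatMap_cons, h a (by simp), ih (fun b hb => h b (by simp [hb]))]

theorem pvEmit_shift (t l : String) (rest : List String) :
    ((pvStarts t rest).map (· + 1)).flatMap (fun i =>
      PySem.Str.strip (PySem.Str.replace (PySem.List.pyGetD (l :: rest) i "") (t ++ ".") "") ::
        pvScan t ((l :: rest).drop (i.toNat + 1))) = pvEmit t rest := by
  rw [List.flatMap_map]
  apply pvFlatMap_congr
  intro i hi
  obtain ⟨k, rfl⟩ := pvStarts_mem_nat t rest i hi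
  have hcast : ((k : Int) + 1) = ((k + 1 : Nat) : Int) := by push_cast; ring
  simp only [hcast, PySem.List.pyGetD_natCast, Int.toNat_natCast]
  simp [List.getD]

theorem pvBGo_skip (t : String) (ys zs : List String)
    (h : ∀ x ∈ ys, pvIsStart t x = false) :
    pvBGo t (ys ++ zs) = pvBGo t zs := by
  induction ys with
  | nil => rfl
  | cons y yr ih =>
    rw [List.cons_append, pvBGo_cons_not t y (yr ++ zs) (h y (by simp))]
    exact ih (fun x hx => h x (by simp [hx]))

theorem pvEmit_eq_pvBGo (t : String) (xs : List String) :
    pvEmit t xs = pvBGo t xs := by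
  induction xs with
  | nil => simp [pvEmit, pvStarts, PySem.List.enumerate_nil, pvBGo]
  | cons l rest ih =>
    by_cases hs : pvIsStart t l = true
    · rw [pvBGo_cons_start t l rest hs]
      have hdecomp : rest = rest.takeWhile (pvCont t) ++
          rest.drop (rest.takeWhile (pvCont t)).length := by
        rw [pvDrop_takeWhile_len]
        exact (List.takeWhile_append_dropWhile).symm
      have hns : ∀ x ∈ rest.takeWhile (pvCont t), pvIsStart t x = false := by
        intro x hx
        have := List.mem_takeWhile_imp hx
        simp only [pvCont, Bool.and_eq_true, Bool.not_eq_true'] at this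
        exact this.1
      have hrest : pvBGo t rest = pvBGo t (rest.drop (rest.takeWhile (pvCont t)).length) := by
        conv_lhs => rw [hdecomp]
        exact pvBGo_skip t _ _ hns
      unfold pvEmit
      rw [pvStarts_cons, hs, if_pos rfl, List.singleton_append, List.flatMap_cons]
      rw [pvEmit_shift t l rest]
      simp only [PySem.List.pyGetD_zero_cons, Int.toNat_zero, List.drop_succ_cons,
        List.drop_zero]
      rw [pvScan_eq, ih, hrest]
      simp
    · have hs' : pvIsStart t l = false := by simpa using hs
      rw [pvBGo_cons_not t l rest hs']
      unfold pvEmit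
      rw [pvStarts_cons, hs', if_neg (by simp), List.nil_append]
      rw [pvEmit_shift t l rest]
      exact ih

-- ===== VERDICT (by name: the statement is the Claim_ definition above) =====
theorem get_character_lines_spec : Claim_equal_get_character_lines := by
  intro character the_play _
  unfold Spec_get_character_lines get_character_lines get_character_lines_alt
  rw [(pvGo_eq _ _).1, ← pvEmit_eq_pvBGo]
  rfl
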